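-- pv_equiv track=rewrite | github.com/abhishekupadhyaycs28-wq/Python_Codes | max_ppl_visible_in_line.py | maxPeople
-- ===== SOURCE A (Python) =====
-- def maxPeople(arr):
--     n = len(arr)
--     left = [0]*n
--     right = [0]*n
--
--     # Left pass using monotonic stack
--     stack = []
--     for i in range(n):
--         while stack and arr[stack[-1]] < arr[i]:
--             left[i] += left[stack.pop()] + 1
--         stack.append(i)
--
--     # Right pass using monotonic stack
--     stack = []
--     for i in range(n-1, -1, -1):
--         while stack and arr[stack[-1]] < arr[i]:
--             right[i] += right[stack.pop()] + 1
--         stack.append(i)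
--
--     return max(left[i]+right[i]+1 for i in range(n))
-- ===== SOURCE B (Python) =====
-- def maxPeople(arr):
--     n = len(arr)
--
--     def count_left(i):
--         # walk left from i while strictly shorter people are seen
--         c = 0
--         j = i - 1
--         while j >= 0 and arr[j] < arr[i]:
--             c += 1
--             j -= 1
--         return c
--
--     def count_right(i):
--         # walk right from i while strictly shorter people are seen
--         c = 0
--         j = i + 1
--         while j < n and arr[j] < arr[i]:
--             c += 1
--             j += 1
--         return c
--
--     return max(count_left(i) + count_right(i) + 1 for i in range(n))
-- ===== Notes on version B (the rewrite author's own statement) =====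
-- stated objective: simpler
-- what changed: Replaces A's two monotonic-stack passes (with telescoped pop counts accumulated into left/right arrays) by direct per-index scans: for each i walk left and right while strictly shorter, then take the max of the counts.
import Mathlib
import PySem

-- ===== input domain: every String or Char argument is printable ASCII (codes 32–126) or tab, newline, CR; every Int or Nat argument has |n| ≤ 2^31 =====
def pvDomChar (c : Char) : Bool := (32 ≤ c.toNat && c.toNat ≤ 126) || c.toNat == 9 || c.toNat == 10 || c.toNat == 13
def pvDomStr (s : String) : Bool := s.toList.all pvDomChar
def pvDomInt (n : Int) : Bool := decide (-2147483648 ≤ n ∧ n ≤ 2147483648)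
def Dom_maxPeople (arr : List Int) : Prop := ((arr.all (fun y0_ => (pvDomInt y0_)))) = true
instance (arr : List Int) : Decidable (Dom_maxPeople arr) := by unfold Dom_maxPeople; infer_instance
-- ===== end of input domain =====

-- B replaces A's two monotonic-stack passes by direct left/right scans from each index (simpler; same values, equivalence proved below).

-- ===== PORT A =====
-- inner `while` loop shared verbatim by A's two passes: pop stack tops with
-- strictly smaller height, accumulating their counts into slot `i`.
def pvWhile (arr : List Int) (acc : List Int) (stack : List Nat) (i : Nat) :
    List Int × List Nat :=
  match stack with
  | [] => (acc, [])
  | t :: rest =>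
    if arr.getD t 0 < arr.getD i 0 then
      pvWhile arr (acc.set i (acc.getD i 0 + (acc.getD t 0 + 1))) rest i
    else (acc, t :: rest)

-- one monotonic-stack pass of A, folded over the index order `idxs`
-- (range n for the left pass, its reverse for the right pass; the indices are
-- the in-range Nat values Python's range produces, so Nat indexing is exact).
def pvPass (arr : List Int) (idxs : List Nat) : List Int :=
  (idxs.foldl
    (fun st i =>
      let p := pvWhile arr st.1 st.2 i
      (p.1, i :: p.2))
    (List.replicate arr.length 0, ([] : List Nat))).1

def maxPeople (arr : List Int) : Int :=
  let n := arr.length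
  let left := pvPass arr (List.range n)
  let right := pvPass arr (List.range n).reverse
  match PySem.List.max? ((List.range n).map
      (fun i => left.getD i 0 + right.getD i 0 + 1)) (fun x => x) with
  | some v => v
  | none => 0   -- unreachable under Pre_ (arr ≠ []): Python's max() raises ValueError

-- ===== PORT B =====
-- count_left: walk left from i while strictly shorter; the guard `0 ≤ j` makes
-- `j.toNat` exact for Python's `arr[j]`.
def altCL (arr : List Int) (pv : Int) (j : Int) : Int :=
  if h : 0 ≤ j ∧ arr.getD j.toNat 0 < pv then altCL arr pv (j - 1) + 1 else 0
termination_by (j + 1).toNat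
decreasing_by omega

-- count_right: walk right from i while strictly shorter (j starts at i+1 ≥ 0).
def altCR (arr : List Int) (n : Nat) (pv : Int) (j : Int) : Int :=
  if h : j < (n : Int) ∧ arr.getD j.toNat 0 < pv then altCR arr n pv (j + 1) + 1 else 0
termination_by ((n : Int) - j).toNat
decreasing_by omega

def maxPeople_alt (arr : List Int) : Int :=
  let n := arr.length
  match PySem.List.max? ((List.range n).map
      (fun i => altCL arr (arr.getD i 0) ((i : Int) - 1)
        + altCR arr n (arr.getD i 0) ((i : Int) + 1) + 1)) (fun x => x) with
  | some v => v
  | none => 0   -- unreachable under Pre_: Python's max() raises ValueError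

-- ===== PRECONDITION & SPEC =====
-- Pre_ excludes exactly the empty list, on which Python A's max() over an empty
-- generator raises ValueError (B's max() raises there too).
def Pre_maxPeople (arr : List Int) : Prop := arr ≠ []
instance (arr : List Int) : Decidable (Pre_maxPeople arr) := by unfold Pre_maxPeople; infer_instance
def pvWitness_maxPeople : List Int := ([1, 3, 2, 3, 1] : List Int)
def Spec_maxPeople (arr : List Int) (out : Int) : Prop := out = maxPeople_alt arr
instance (arr : List Int) (out : Int) : Decidable (Spec_maxPeople arr out) := by unfold Spec_maxPeople; infer_instance

-- ===== CLAIM (what is proved, stated in full; the proofs are below) =====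
def Claim_equal_maxPeople : Prop := ∀ (arr : List Int), Dom_maxPeople arr → Pre_maxPeople arr → Spec_maxPeople arr (maxPeople arr)

-- ===== LEMMAS AND PROOFS =====

-- length of the maximal run of values `< pv` immediately below position k
def runL (v : Nat → Int) (pv : Int) : Nat → Int
  | 0 => 0
  | j + 1 => if v j < pv then runL v pv j + 1 else 0

theorem runL_congr (v w : Nat → Int) (pv : Int) (k : Nat)
    (h : ∀ j, j < k → v j = w j) : runL v pv k = runL w pv k := by
  induction k with
  | zero => rfl
  | succ j ih =>
      simp only [runL, h j (by omega), ih (fun j hj => h j (by omega))]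

theorem runL_all (v : Nat → Int) (pv : Int) (k : Nat)
    (h : ∀ j, j < k → v j < pv) : runL v pv k = (k : Int) := by
  induction k with
  | zero => rfl
  | succ j ih =>
      simp only [runL, if_pos (h j (by omega)), ih (fun j hj => h j (by omega))]
      push_cast
      ring

theorem runL_stop (v : Nat → Int) (pv : Int) (k t : Nat)
    (htk : t < k) (ht : ¬ v t < pv) (h : ∀ j, t < j → j < k → v j < pv) :
    runL v pv k = (k : Int) - t - 1 := by
  induction k with
  | zero => omega
  | succ j ih =>
      by_cases hjt : j = t
      · subst hjt; simp only [runL, if_neg ht]; push_cast; omega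
      · have hj : v j < pv := h j (by omega) (by omega)
        simp only [runL, if_pos hj, ih (by omega) (fun x hx1 hx2 => h x hx1 (by omega))]
        push_cast; ring

-- time-domain (position-indexed) model of A's pass, with a functional table
def tWhile (v : Nat → Int) (M : Nat → Int) (stack : List Nat) (k : Nat) :
    (Nat → Int) × List Nat :=
  match stack with
  | [] => (M, [])
  | t :: rest =>
    if v t < v k then
      tWhile v (fun m => if m = k then M k + (M t + 1) else M m) rest k
    else (M, t :: rest)

def tStep (v : Nat → Int) (st : (Nat → Int) × List Nat) (k : Nat) :
    (Nat → Int) × List Nat :=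
  let p := tWhile v st.1 st.2 k
  (p.1, k :: p.2)

def tPass (v : Nat → Int) (m : Nat) : (Nat → Int) × List Nat :=
  (List.range m).foldl (tStep v) ((fun _ => 0), [])

-- adjacency relation maintained on the stack (top-first)
def SR (v : Nat → Int) (q p : Nat) : Prop :=
  p < q ∧ v q ≤ v p ∧ ∀ j, p < j → j < q → v j < v q

def Cov (v : Nat → Int) (M : Nat → Int) (k : Nat) : List Nat → Prop
  | [] => M k = (k : Int) ∧ ∀ j, j < k → v j < v k
  | t :: _ => M k = (k : Int) - t - 1 ∧ ∀ j, t < j → j < k → v j < v k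

def Cov' (v : Nat → Int) (k : Nat) : List Nat → Prop
  | [] => ∀ j, j < k → v j < v k
  | t :: _ => ¬ v t < v k ∧ ∀ j, t < j → j < k → v j < v k

theorem tWhile_suffix (v : Nat → Int) (M : Nat → Int) (S : List Nat) (k : Nat) :
    (tWhile v M S k).2 <:+ S := by
  induction S generalizing M with
  | nil => exact List.suffix_refl _
  | cons t rest ih =>
      rw [tWhile]
      by_cases h : v t < v k
      · rw [if_pos h]
        exact (ih _).trans (List.suffix_cons t rest)
      · rw [if_neg h]

theorem tWhile_spec (v : Nat → Int) (k : Nat) :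
    ∀ (S : List Nat) (M : Nat → Int),
    (∀ j, j < k → M j = runL v (v j) j) →
    S.IsChain (SR v) →
    (∀ b, S.getLast? = some b → ∀ j, j < b → v j < v b) →
    (∀ q ∈ S, q < k) →
    Cov v M k S →
    (tWhile v M S k).1 k = runL v (v k) k ∧
    (∀ j, j ≠ k → (tWhile v M S k).1 j = M j) ∧
    (tWhile v M S k).2 <:+ S ∧
    Cov' v k (tWhile v M S k).2 := by
  intro S
  induction S with
  | nil =>
      intro M hM _ _ _ hcov
      obtain ⟨hMk, hall⟩ := hcov
      refine ⟨?_, fun j _ => rfl, List.suffix_refl _, hall⟩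
      simp only [tWhile]
      rw [runL_all v (v k) k hall, hMk]
  | cons t rest ih =>
      intro M hM hchain hbot hmem hcov
      obtain ⟨hMk, hgap⟩ := hcov
      have htk : t < k := hmem t (by simp)
      by_cases hvt : v t < v k
      · -- pop t
        set M' : Nat → Int := fun m => if m = k then M k + (M t + 1) else M m with hM'def
        have hMt : M t = runL v (v t) t := hM t htk
        have hM'k : M' k = M k + (M t + 1) := by simp [hM'def]
        have hM' : ∀ j, j < k → M' j = runL v (v j) j := by
          intro j hj
          have : j ≠ k := by omega
          simp only [hM'def, if_neg this]
          exact hM j hj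
        have hchain' : rest.IsChain (SR v) := hchain.suffix (List.suffix_cons t rest)
        have hbot' : ∀ b, rest.getLast? = some b → ∀ j, j < b → v j < v b := by
          intro b hb
          apply hbot b
          have hne : rest ≠ [] := by intro h; subst h; simp at hb
          cases rest with
          | nil => simp at hb
          | cons x xs => rw [List.getLast?_cons_cons]; exact hb
        have hmem' : ∀ q ∈ rest, q < k := fun q hq => hmem q (by simp [hq])
        have hcov' : Cov v M' k rest := by
          cases rest with
          | nil =>
              have hbt : ∀ j, j < t → v j < v t := hbot t (by simp)
              constructor
              · rw [hM'k, hMk, hMt, runL_all v (v t) t hbt]; push_cast; ring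
              · intro j hj
                rcases lt_trichotomy j t with h | h | h
                · exact lt_trans (hbt j h) hvt
                · subst h; exact hvt
                · exact hgap j h hj
          | cons p rest' =>
              have hR : SR v t p := (List.isChain_cons_cons.mp hchain).1
              obtain ⟨hpt, hvtp, hgap2⟩ := hR
              constructor
              · rw [hM'k, hMk, hMt, runL_stop v (v t) t p hpt (not_lt.mpr hvtp) hgap2]
                push_cast; ring
              · intro j hj1 hj2
                rcases lt_trichotomy j t with h | h | h
                · exact lt_trans (hgap2 j hj1 h) hvt
                · subst h; exact hvt
                · exact hgap j h hj2
        have result := ih M' hM' hchain' hbot' hmem' hcov'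
        obtain ⟨c1, c2, c3, c4⟩ := result
        have hstep : tWhile v M (t :: rest) k = tWhile v M' rest k := by
          rw [tWhile, if_pos hvt]
        refine ⟨by rw [hstep]; exact c1, ?_, ?_, by rw [hstep]; exact c4⟩
        · intro j hj
          rw [hstep, c2 j hj]
          simp only [hM'def, if_neg hj]
        · rw [hstep]
          exact c3.trans (List.suffix_cons t rest)
      · -- stop: top is not shorter
        have hstep : tWhile v M (t :: rest) k = (M, t :: rest) := by
          rw [tWhile, if_neg hvt]
        refine ⟨?_, fun j _ => by rw [hstep], by rw [hstep], by rw [hstep]; exact ⟨hvt, hgap⟩⟩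
        rw [hstep]
        simp only
        rw [hMk, runL_stop v (v k) k t htk hvt hgap]

def TInv (v : Nat → Int) (k : Nat) (st : (Nat → Int) × List Nat) : Prop :=
  (∀ j, j < k → st.1 j = runL v (v j) j) ∧
  (∀ j, k ≤ j → st.1 j = 0) ∧
  (st.2 = [] → k = 0) ∧
  (∀ t r, st.2 = t :: r → t + 1 = k) ∧
  st.2.IsChain (SR v) ∧
  (∀ b, st.2.getLast? = some b → ∀ j, j < b → v j < v b) ∧
  (∀ q ∈ st.2, q < k)

theorem tStep_inv (v : Nat → Int) (k : Nat) (st : (Nat → Int) × List Nat)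
    (h : TInv v k st) : TInv v (k + 1) (tStep v st k) := by
  obtain ⟨i1, i2, i3, i4, i5, i6, i7⟩ := h
  have hcov : Cov v st.1 k st.2 := by
    cases hs : st.2 with
    | nil =>
        have hk0 : k = 0 := i3 hs
        subst hk0
        exact ⟨by rw [i2 0 le_rfl]; rfl, by omega⟩
    | cons t r =>
        have ht : t + 1 = k := i4 t r hs
        constructor
        · rw [i2 k le_rfl]; omega
        · intro j hj1 hj2; omega
  have hw := tWhile_spec v k st.2 st.1 i1 i5 i6 i7 hcov
  obtain ⟨c1, c2, c3, c4⟩ := hw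
  have hmem' : ∀ q ∈ (tWhile v st.1 st.2 k).2, q < k := fun q hq => i7 q (c3.subset hq)
  refine ⟨?_, ?_, ?_, ?_, ?_, ?_, ?_⟩
  · intro j hj
    rcases Nat.lt_succ_iff_lt_or_eq.mp hj with h | h
    · rw [show (tStep v st k).1 = (tWhile v st.1 st.2 k).1 from rfl, c2 j (by omega)]
      exact i1 j h
    · subst h
      exact c1
  · intro j hj
    rw [show (tStep v st k).1 = (tWhile v st.1 st.2 k).1 from rfl, c2 j (by omega)]
    exact i2 j (by omega)
  · intro h; simp [tStep] at h
  · intro t r h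
    have : t = k := by
      have : (tStep v st k).2 = k :: (tWhile v st.1 st.2 k).2 := rfl
      rw [this] at h
      exact (List.cons.injEq _ _ _ _ ▸ h).1.symm
    omega
  · show (k :: (tWhile v st.1 st.2 k).2).IsChain (SR v)
    cases hs : (tWhile v st.1 st.2 k).2 with
    | nil => simp
    | cons t r =>
        rw [List.isChain_cons_cons]
        constructor
        · have hc4 : Cov' v k (t :: r) := hs ▸ c4
          exact ⟨hmem' t (by rw [hs]; simp), not_lt.mp hc4.1, hc4.2⟩
        · exact hs ▸ (i5.suffix c3)
  · intro b hb j hj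
    cases hs : (tWhile v st.1 st.2 k).2 with
    | nil =>
        have : (tStep v st k).2 = [k] := by simp [tStep, hs]
        rw [this] at hb
        simp at hb
        subst hb
        exact (hs ▸ c4) j hj
    | cons t r =>
        have hne : (tWhile v st.1 st.2 k).2 ≠ [] := by rw [hs]; simp
        have hb' : (tWhile v st.1 st.2 k).2.getLast? = some b := by
          have : (tStep v st k).2 = k :: (tWhile v st.1 st.2 k).2 := rfl
          rw [this] at hb
          rw [hs] at hb ⊢
          rwa [List.getLast?_cons_cons] at hb
        obtain ⟨pre, hpre⟩ := c3
        apply i6 b _ j hj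
        rw [← hpre, List.getLast?_append_of_ne_nil _ hne]
        exact hb'
  · intro q hq
    rcases (List.mem_cons.mp hq) with h | h
    · omega
    · exact lt_trans (hmem' q h) (by omega)

theorem tPass_inv (v : Nat → Int) (m : Nat) : TInv v m (tPass v m) := by
  induction m with
  | zero =>
      refine ⟨by omega, fun _ _ => rfl, fun _ => rfl, by simp [tPass], by simp [tPass], by simp [tPass], by simp [tPass]⟩
  | succ m ih =>
      have : tPass v (m + 1) = tStep v (tPass v m) m := by
        simp [tPass, List.range_succ]
      rw [this]
      exact tStep_inv v m _ ih

theorem tPass_spec (v : Nat → Int) (m : Nat) :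
    ∀ k, k < m → (tPass v m).1 k = runL v (v k) k :=
  (tPass_inv v m).1

-- conjugation: A's concrete pass over `idxs` equals the time-domain pass
theorem getD_mem (idxs : List Nat) (k : Nat) (hk : k < idxs.length) :
    idxs.getD k 0 ∈ idxs := by
  rw [List.getD_eq_getElem _ _ hk]; exact List.getElem_mem hk

theorem getD_inj (idxs : List Nat) (hnd : idxs.Nodup) (k k' : Nat)
    (hk : k < idxs.length) (hk' : k' < idxs.length)
    (h : idxs.getD k 0 = idxs.getD k' 0) : k = k' := by
  rw [List.getD_eq_getElem _ _ hk, List.getD_eq_getElem _ _ hk'] at h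
  exact (List.Nodup.getElem_inj_iff hnd).mp h

theorem pvWhile_corr (arr : List Int) (idxs : List Nat)
    (hlt : ∀ x ∈ idxs, x < arr.length) (hnd : idxs.Nodup) (k : Nat)
    (hk : k < idxs.length) :
    ∀ (T : List Nat) (L : List Int) (M : Nat → Int),
    L.length = arr.length →
    (∀ m ∈ T, m < idxs.length) →
    (∀ m, m < idxs.length → L.getD (idxs.getD m 0) 0 = M m) →
    (pvWhile arr L (T.map (fun m => idxs.getD m 0)) (idxs.getD k 0)).1.length = arr.length ∧
    (∀ m, m < idxs.length →
      (pvWhile arr L (T.map (fun m => idxs.getD m 0)) (idxs.getD k 0)).1.getD (idxs.getD m 0) 0 =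
      (tWhile (fun m => arr.getD (idxs.getD m 0) 0) M T k).1 m) ∧
    (pvWhile arr L (T.map (fun m => idxs.getD m 0)) (idxs.getD k 0)).2 =
      (tWhile (fun m => arr.getD (idxs.getD m 0) 0) M T k).2.map (fun m => idxs.getD m 0) := by
  intro T
  induction T with
  | nil =>
      intro L M hL _ hcorr
      exact ⟨hL, fun m hm => by simpa [pvWhile, tWhile] using hcorr m hm, by simp [pvWhile, tWhile]⟩
  | cons t T' ih =>
      intro L M hL hmem hcorr
      have htlen : t < idxs.length := hmem t (by simp)
      have hfk : idxs.getD k 0 < arr.length := hlt _ (getD_mem idxs k hk)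
      by_cases hc : arr.getD (idxs.getD t 0) 0 < arr.getD (idxs.getD k 0) 0
      · have hstepA : pvWhile arr L ((t :: T').map (fun m => idxs.getD m 0)) (idxs.getD k 0) =
            pvWhile arr (L.set (idxs.getD k 0)
              (L.getD (idxs.getD k 0) 0 + (L.getD (idxs.getD t 0) 0 + 1)))
              (T'.map (fun m => idxs.getD m 0)) (idxs.getD k 0) := by
          rw [List.map_cons, pvWhile, if_pos hc]
        have hstepT : tWhile (fun m => arr.getD (idxs.getD m 0) 0) M (t :: T') k =
            tWhile (fun m => arr.getD (idxs.getD m 0) 0)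
              (fun m => if m = k then M k + (M t + 1) else M m) T' k := by
          rw [tWhile, if_pos hc]
        rw [hstepA, hstepT]
        apply ih
        · simp [hL]
        · exact fun m hm => hmem m (by simp [hm])
        · intro m hm
          by_cases hmk : m = k
          · subst hmk
            rw [List.getD, List.getElem?_set_self (by omega), Option.getD_some,
              hcorr m hm, hcorr t htlen]
            simp
          · have hne : idxs.getD k 0 ≠ idxs.getD m 0 := by
              intro h; exact hmk (getD_inj idxs hnd m k hm hk h.symm)
            rw [List.getD, List.getElem?_set_ne hne, ← List.getD]
            simp only [if_neg hmk]
            exact hcorr m hm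
      · have hstepA : pvWhile arr L ((t :: T').map (fun m => idxs.getD m 0)) (idxs.getD k 0) =
            (L, (idxs.getD t 0) :: T'.map (fun m => idxs.getD m 0)) := by
          rw [List.map_cons, pvWhile, if_neg hc]
        have hstepT : tWhile (fun m => arr.getD (idxs.getD m 0) 0) M (t :: T') k =
            (M, t :: T') := by
          rw [tWhile, if_neg hc]
        rw [hstepA, hstepT]
        exact ⟨hL, fun m hm => hcorr m hm, by simp⟩

def PCorr (arr : List Int) (idxs : List Nat) (st : List Int × List Nat)
    (tst : (Nat → Int) × List Nat) : Prop :=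
  st.1.length = arr.length ∧
  (∀ m, m < idxs.length → st.1.getD (idxs.getD m 0) 0 = tst.1 m) ∧
  st.2 = tst.2.map (fun m => idxs.getD m 0) ∧
  (∀ q ∈ tst.2, q < idxs.length)

theorem pvPass_corr (arr : List Int) (idxs : List Nat)
    (hlt : ∀ x ∈ idxs, x < arr.length) (hnd : idxs.Nodup) :
    ∀ s, s ≤ idxs.length →
    PCorr arr idxs
      ((List.range s).foldl
        (fun st k =>
          let p := pvWhile arr st.1 st.2 (idxs.getD k 0)
          (p.1, (idxs.getD k 0) :: p.2))
        (List.replicate arr.length 0, ([] : List Nat)))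
      ((List.range s).foldl (tStep (fun m => arr.getD (idxs.getD m 0) 0)) ((fun _ => 0), [])) := by
  intro s
  induction s with
  | zero =>
      intro _
      refine ⟨by simp, ?_, by simp, by simp⟩
      intro m hm
      rcases lt_or_ge (idxs.getD m 0) arr.length with h | h
      · simp [List.getD]
      · simp [List.getD]
  | succ s ih =>
      intro hs
      have hcorr := ih (by omega)
      obtain ⟨p1, p2, p3, p4⟩ := hcorr
      set cst := (List.range s).foldl
        (fun st k =>
          let p := pvWhile arr st.1 st.2 (idxs.getD k 0)
          (p.1, (idxs.getD k 0) :: p.2))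
        (List.replicate arr.length 0, ([] : List Nat)) with hcst
      set tst := (List.range s).foldl (tStep (fun m => arr.getD (idxs.getD m 0) 0)) ((fun _ => 0), []) with htst
      have hstepc : (List.range (s+1)).foldl
          (fun st k =>
            let p := pvWhile arr st.1 st.2 (idxs.getD k 0)
            (p.1, (idxs.getD k 0) :: p.2))
          (List.replicate arr.length 0, ([] : List Nat)) =
          (let p := pvWhile arr cst.1 cst.2 (idxs.getD s 0)
           (p.1, (idxs.getD s 0) :: p.2)) := by
        rw [List.range_succ, List.foldl_append, List.foldl_cons, List.foldl_nil, hcst]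
      have hstept : (List.range (s+1)).foldl (tStep (fun m => arr.getD (idxs.getD m 0) 0)) ((fun _ => 0), []) =
          tStep (fun m => arr.getD (idxs.getD m 0) 0) tst s := by
        rw [List.range_succ, List.foldl_append, List.foldl_cons, List.foldl_nil, htst]
      rw [hstepc, hstept]
      have hw := pvWhile_corr arr idxs hlt hnd s (by omega) tst.2 cst.1 tst.1 p1 p4 p2
      rw [← p3] at hw
      obtain ⟨w1, w2, w3⟩ := hw
      refine ⟨w1, fun m hm => w2 m hm, ?_, ?_⟩
      · show (idxs.getD s 0) :: (pvWhile arr cst.1 cst.2 (idxs.getD s 0)).2 =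
          ((s :: (tWhile (fun m => arr.getD (idxs.getD m 0) 0) tst.1 tst.2 s).2).map
            (fun m => idxs.getD m 0))
        rw [List.map_cons, w3]
      · intro q hq
        rcases List.mem_cons.mp hq with h | h
        · omega
        · exact lt_of_lt_of_le (p4 q ((tWhile_suffix _ _ _ _).subset h)) (by omega)

theorem pvPass_spec (arr : List Int) (idxs : List Nat)
    (hlt : ∀ x ∈ idxs, x < arr.length) (hnd : idxs.Nodup) :
    ∀ k, k < idxs.length →
      (pvPass arr idxs).getD (idxs.getD k 0) 0 =
        runL (fun m => arr.getD (idxs.getD m 0) 0)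
          (arr.getD (idxs.getD k 0) 0) k := by
  intro k hk
  have hidx : idxs = (List.range idxs.length).map (fun m => idxs.getD m 0) := by
    apply List.ext_getElem
    · simp
    · intro i hi _
      simp only [List.getElem_map, List.getElem_range]
      exact (List.getD_eq_getElem _ _ hi).symm
  have hfold : pvPass arr idxs =
      ((List.range idxs.length).foldl
        (fun st k =>
          let p := pvWhile arr st.1 st.2 (idxs.getD k 0)
          (p.1, (idxs.getD k 0) :: p.2))
        (List.replicate arr.length 0, ([] : List Nat))).1 := by
    rw [pvPass]
    conv_lhs => rw [hidx]
    rw [List.foldl_map]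
  have hcorr := pvPass_corr arr idxs hlt hnd idxs.length le_rfl
  obtain ⟨_, p2, _, _⟩ := hcorr
  rw [hfold, p2 k hk]
  exact tPass_spec (fun m => arr.getD (idxs.getD m 0) 0) idxs.length k hk

-- B's two walks expressed as runL
theorem altCL_eq_runL (arr : List Int) (pv : Int) (i : Nat) :
    altCL arr pv ((i : Int) - 1) = runL (fun m => arr.getD m 0) pv i := by
  induction i with
  | zero => rw [altCL]; simp [runL]
  | succ j ih =>
      rw [altCL, runL]
      have h1 : ((j + 1 : Nat) : Int) - 1 = (j : Int) := by push_cast; ring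
      rw [h1]
      have h2 : ((j : Int)).toNat = j := Int.toNat_natCast j
      by_cases h : arr.getD j 0 < pv
      · rw [dif_pos ⟨by omega, by rwa [h2]⟩, if_pos h, ih]
      · rw [dif_neg (fun hc => h (by have hh := hc.2; rwa [h2] at hh)), if_neg h]

theorem altCR_eq_runL (arr : List Int) (n : Nat) (pv : Int) :
    ∀ (d j : Nat), n - j = d → altCR arr n pv (j : Int) =
      runL (fun m => arr.getD (n - 1 - m) 0) pv (n - j) := by
  intro d
  induction d with
  | zero =>
      intro j hj
      have hnj : ¬ ((j : Int) < (n : Int)) := by omega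
      rw [altCR, dif_neg (fun hc => hnj hc.1), hj]
      rfl
  | succ d ihd =>
      intro j hj
      have hjn : j < n := by omega
      have h2 : ((j : Int)).toNat = j := Int.toNat_natCast j
      rw [altCR, hj, runL]
      have hv : arr.getD (n - 1 - d) 0 = arr.getD j 0 := by
        congr 1
        omega
      by_cases h : arr.getD j 0 < pv
      · rw [dif_pos ⟨by exact_mod_cast hjn, by rwa [h2]⟩, if_pos (by rwa [hv])]
        have h3 : ((j : Int)) + 1 = ((j + 1 : Nat) : Int) := by push_cast; ring
        rw [h3, ihd (j + 1) (by omega), show n - (j + 1) = d by omega]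
      · rw [dif_neg (fun hc => h (by have hh := hc.2; rwa [h2] at hh)), if_neg (by rwa [hv])]

-- the per-index terms of A and B coincide
theorem terms_eq (arr : List Int) (i : Nat) (hi : i < arr.length) :
    (pvPass arr (List.range arr.length)).getD i 0 +
      (pvPass arr (List.range arr.length).reverse).getD i 0 + 1 =
    altCL arr (arr.getD i 0) ((i : Int) - 1) +
      altCR arr arr.length (arr.getD i 0) ((i : Int) + 1) + 1 := by
  set n := arr.length with hn
  have hrange_getD : ∀ m, m < n → (List.range n).getD m 0 = m := by
    intro m hm
    rw [List.getD_eq_getElem _ _ (by simpa using hm), List.getElem_range]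
  have hrev_getD : ∀ m, m < n → (List.range n).reverse.getD m 0 = n - 1 - m := by
    intro m hm
    rw [List.getD_eq_getElem _ _ (by simpa using hm)]
    simp [List.getElem_reverse]
  -- left entry
  have hleft : (pvPass arr (List.range n)).getD i 0 = runL (fun m => arr.getD m 0) (arr.getD i 0) i := by
    have := pvPass_spec arr (List.range n)
      (by intro x hx; rw [← hn]; simpa using List.mem_range.mp hx)
      (List.nodup_range) i (by simpa using hi)
    rw [hrange_getD i hi] at this
    rw [this]
    apply runL_congr
    intro j hj
    rw [hrange_getD j (by omega)]
  -- right entry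
  have hright : (pvPass arr (List.range n).reverse).getD i 0 =
      runL (fun m => arr.getD (n - 1 - m) 0) (arr.getD i 0)  (n - 1 - i) := by
    have hk : n - 1 - i < (List.range n).reverse.length := by simp; omega
    have := pvPass_spec arr (List.range n).reverse
      (by intro x hx; rw [← hn]; simpa using List.mem_range.mp (List.mem_reverse.mp hx))
      (List.nodup_reverse.mpr List.nodup_range) (n - 1 - i) hk
    rw [hrev_getD (n - 1 - i) (by omega), show n - 1 - (n - 1 - i) = i by omega] at this
    rw [this]
    apply runL_congr
    intro j hj
    rw [hrev_getD j (by omega)]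
  rw [hleft, hright, altCL_eq_runL]
  have h3 : ((i : Int)) + 1 = ((i + 1 : Nat) : Int) := by push_cast; ring
  rw [h3, altCR_eq_runL arr n (arr.getD i 0) (n - (i + 1)) (i + 1) rfl,
    show n - (i + 1) = n - 1 - i by omega]

-- ===== VERDICT (by name: the statement is the Claim_ definition above) =====
theorem maxPeople_spec : Claim_equal_maxPeople := by
  intro arr _ _
  unfold Spec_maxPeople maxPeople maxPeople_alt
  simp only
  have hlists : (List.range arr.length).map
      (fun i => (pvPass arr (List.range arr.length)).getD i 0 +
        (pvPass arr (List.range arr.length).reverse).getD i 0 + 1) =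
      (List.range arr.length).map
      (fun i => altCL arr (arr.getD i 0) ((i : Int) - 1) +
        altCR arr arr.length (arr.getD i 0) ((i : Int) + 1) + 1) := by
    apply List.map_congr_left
    intro i hi
    exact terms_eq arr i (List.mem_range.mp hi)
  rw [hlists]
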